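-- pv_equiv track=rewrite | github.com/saytakov/CodeRun | easy/129/main.py | dfs
-- ===== SOURCE A (Python) =====
-- from collections import deque
--
-- def dfs(parent_child, parent):
--     result: set[tuple[str, int]] = set()
--
--     queue = deque([[parent]])
--
--     while queue:
--         cur_queue = queue.popleft()
--         cur_child = cur_queue[-1]
--
--         if cur_child in parent_child:
--             for child in parent_child[cur_child]:
--                 new_queue = cur_queue.copy()
--                 new_queue.append(child)
--                 result.add((cur_child, len(cur_queue) - 1))
--                 queue.appendleft(new_queue)
--         else:
--             result.add((cur_child, len(cur_queue) - 1))
--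
--     return result
-- ===== SOURCE B (Python) =====
-- def dfs(parent_child, parent):
--     # Plain recursive DFS over (node, depth) states: no queue of whole
--     # root-paths and no path copying.  Children are explored right-to-left
--     # (the order A's appendleft stack induces); the returned set does not
--     # depend on the traversal order.
--     result: set[tuple[str, int]] = set()
--
--     def visit(node, depth):
--         children = parent_child.get(node)
--         if children is None:
--             result.add((node, depth))
--         else:
--             for child in reversed(children):
--                 result.add((node, depth))
--                 visit(child, depth + 1)
--
--     visit(parent, 0)
--     return result
-- ===== Notes on version B (the rewrite author's own statement) =====
-- stated objective: simpler
-- what changed: B replaces A's worklist of whole root-paths (a fresh list copied and extended at every step, with node and depth re-derived from the path) by a plain recursive DFS carrying only (node, depth), eliminating all path copying.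
import Mathlib
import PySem

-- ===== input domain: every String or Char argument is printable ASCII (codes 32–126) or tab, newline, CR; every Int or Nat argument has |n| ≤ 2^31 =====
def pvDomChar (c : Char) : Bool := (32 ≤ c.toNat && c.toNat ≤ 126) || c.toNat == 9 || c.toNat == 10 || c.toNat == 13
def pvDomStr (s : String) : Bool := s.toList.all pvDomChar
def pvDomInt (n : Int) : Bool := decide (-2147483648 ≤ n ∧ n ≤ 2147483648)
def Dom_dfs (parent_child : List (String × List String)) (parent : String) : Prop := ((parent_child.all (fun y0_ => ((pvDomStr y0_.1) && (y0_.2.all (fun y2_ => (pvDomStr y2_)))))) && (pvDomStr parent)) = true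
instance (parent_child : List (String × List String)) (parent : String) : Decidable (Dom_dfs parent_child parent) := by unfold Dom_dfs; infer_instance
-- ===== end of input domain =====

-- B replaces A's worklist of whole root-paths (a fresh list copied at every step, node and depth
-- re-derived from the path) by a plain recursive DFS over (node, depth) states — no path copying;
-- objective: alternative/simpler. Both ports carry the same fuel budget as a totality guard only:
-- on a graph with a cycle reachable from `parent` both Pythons never finish (A's loop re-enqueues
-- ever-longer paths, B's recursion never returns), while the ports stop at fuel exhaustion with
-- equal partial results; wherever the Pythons terminate the fuel is ample.

-- fuel bound shared by both ports: (#edges + 2) ^ (#keys + 2) caps the number of root-paths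
-- (hence A's loop iterations = B's recursive calls) whenever the reachable subgraph is acyclic.
def dfsFuel (parent_child : List (String × List String)) : Nat :=
  (parent_child.foldl (fun a p => a + p.2.length) 0 + 2) ^ (parent_child.length + 2)

-- ===== PORT A =====
-- dict lookup on the assoc list = first match ('cur_child in parent_child' + 'parent_child[cur_child]')
def dfsLoopA (pc : List (String × List String)) :
    Nat → List (List String) → List (String × Int) → List (String × Int)
  | 0, _, r => r
  | _ + 1, [], r => r            -- while queue: queue empty → return result
  | f + 1, cur :: qs, r =>
    match PySem.List.pyGet? cur (-1) with   -- cur_queue[-1]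
    | none => r                  -- IndexError (unreachable: queued paths are nonempty)
    | some c =>
      match (pc.find? (fun p => p.1 == c)).map Prod.snd with
      | some cs =>
        -- for child in pc[c]: result.add((c, len(cur)-1)); queue.appendleft(cur ++ [child])
        let st := cs.foldl
          (fun (st : List (List String) × List (String × Int)) child =>
            ((cur ++ [child]) :: st.1, PySem.Set.add st.2 (c, (cur.length : Int) - 1)))
          (qs, r)
        dfsLoopA pc f st.1 st.2
      | none => dfsLoopA pc f qs (PySem.Set.add r (c, (cur.length : Int) - 1))

def dfs (parent_child : List (String × List String)) (parent : String) : List (String × Int) :=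
  dfsLoopA parent_child (dfsFuel parent_child) [[parent]] []

-- ===== PORT B =====
-- visit(node, depth) mutating `result`; returns (fuel consumed, result) — one unit of fuel per
-- call, so the guard cuts off exactly where A's loop-fuel does.  visitChildren is the body's
-- 'for child in reversed(children): result.add((node, depth)); visit(child, depth + 1)'.
mutual
def visitB (pc : List (String × List String)) (f : Nat) (n : String) (d : Int)
    (r : List (String × Int)) : Nat × List (String × Int) :=
  match f with
  | 0 => (0, r)
  | g + 1 =>
    match (pc.find? (fun p => p.1 == n)).map Prod.snd with   -- parent_child.get(node)
    | none => (1, PySem.Set.add r (n, d))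
    | some cs =>
      let p := visitChildren pc g n d cs.reverse r
      (p.1 + 1, p.2)
termination_by (f, 0)
decreasing_by
  apply Prod.Lex.left; omega

def visitChildren (pc : List (String × List String)) (f : Nat) (n : String) (d : Int)
    (l : List String) (r : List (String × Int)) : Nat × List (String × Int) :=
  match l with
  | [] => (0, r)
  | c :: rest =>
    let p := visitB pc f c (d + 1) (PySem.Set.add r (n, d))
    let q := visitChildren pc (f - p.1) n d rest p.2
    (p.1 + q.1, q.2)
termination_by (f, l.length + 1)
decreasing_by
  · apply Prod.Lex.right; simp
  · rcases Nat.lt_or_ge (f - p.1) f with h | h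
    · exact Prod.Lex.left _ _ h
    · have : f - p.1 = f := Nat.le_antisymm (Nat.sub_le _ _) h
      rw [this]; apply Prod.Lex.right; simp
end

def dfs_alt (parent_child : List (String × List String)) (parent : String) : List (String × Int) :=
  (visitB parent_child (dfsFuel parent_child) parent 0 []).2

-- ===== PRECONDITION & SPEC =====
def Spec_dfs (parent_child : List (String × List String)) (parent : String) (out : List (String × Int)) : Prop := out = dfs_alt parent_child parent
instance (parent_child : List (String × List String)) (parent : String) (out : List (String × Int)) : Decidable (Spec_dfs parent_child parent out) := by unfold Spec_dfs; infer_instance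

-- ===== CLAIM (what is proved, stated in full; the proofs are below) =====
def Claim_equal_dfs : Prop := ∀ (parent_child : List (String × List String)) (parent : String), Dom_dfs parent_child parent → Spec_dfs parent_child parent (dfs parent_child parent)

-- ===== LEMMAS AND PROOFS =====

theorem add_mem_self (r : List (String × Int)) (x : String × Int) : x ∈ PySem.Set.add r x := by
  simp [PySem.Set.mem_add]

theorem pvSetAdd_idem (r : List (String × Int)) (x : String × Int) (h : x ∈ r) :
    PySem.Set.add r x = r := by
  simp [PySem.Set.add, h]

theorem loopA_nil (pc : List (String × List String)) (f : Nat) (r : List (String × Int)) :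
    dfsLoopA pc f [] r = r := by
  cases f <;> rfl

theorem visit_mono (pc : List (String × List String)) :
    ∀ f : Nat,
      (∀ (n : String) (d : Int) (r : List (String × Int)) (x : String × Int),
        x ∈ r → x ∈ (visitB pc f n d r).2) ∧
      (∀ (l : List String) (g : Nat), g ≤ f →
        ∀ (n : String) (d : Int) (r : List (String × Int)) (x : String × Int),
          x ∈ r → x ∈ (visitChildren pc g n d l r).2) := by
  intro f
  induction f using Nat.strong_induction_on with
  | _ f IH =>
    have h1 : ∀ (n : String) (d : Int) (r : List (String × Int)) (x : String × Int),
        x ∈ r → x ∈ (visitB pc f n d r).2 := by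
      intro n d r x hx
      match f, IH with
      | 0, _ => simpa [visitB] using hx
      | g + 1, IH =>
        cases hf : (pc.find? (fun p => p.1 == n)).map Prod.snd with
        | none => simp [visitB, hf, PySem.Set.mem_add, hx]
        | some cs =>
          simp only [visitB, hf]
          exact (IH g (by omega)).2 cs.reverse g le_rfl n d r x hx
    refine ⟨h1, ?_⟩
    intro l
    induction l with
    | nil => intro g _ n d r x hx; simpa [visitChildren] using hx
    | cons c rest ihl =>
      intro g hg n d r x hx
      simp only [visitChildren]
      have hx1 : x ∈ (visitB pc g c (d + 1) (PySem.Set.add r (n, d))).2 := by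
        have hxr : x ∈ PySem.Set.add r (n, d) := by simp [PySem.Set.mem_add, hx]
        rcases Nat.lt_or_ge g f with h | h
        · exact (IH g h).1 c (d + 1) _ x hxr
        · have : g = f := by omega
          subst this
          exact h1 c (d + 1) _ x hxr
      exact ihl (g - (visitB pc g c (d + 1) (PySem.Set.add r (n, d))).1)
        (by omega) n d _ x hx1

-- A's inner for-loop: the queue gains the extended paths (reversed) and the result gains (c,d)
theorem foldA_char (cur : List String) (x : String × Int) :
    ∀ (cs : List String) (qs : List (List String)) (r : List (String × Int)),
      (cs.foldl
        (fun (st : List (List String) × List (String × Int)) child =>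
          ((cur ++ [child]) :: st.1, PySem.Set.add st.2 x))
        (qs, r))
      = (cs.reverse.map (fun ch => cur ++ [ch]) ++ qs, if cs = [] then r else PySem.Set.add r x) := by
  intro cs
  induction cs with
  | nil => intro qs r; rfl
  | cons ch cs' ih =>
    intro qs r
    simp only [List.foldl_cons, ih, List.reverse_cons, List.map_append, List.map_cons,
      List.map_nil, List.append_assoc, List.cons_append, List.nil_append]
    by_cases h : cs' = []
    · simp [h]
    · simp [h]

theorem visitChildren_absorb (pc : List (String × List String)) (g : Nat) (n : String) (d : Int)
    (l : List String) (r : List (String × Int)) (h : l ≠ []) :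
    visitChildren pc g n d l (PySem.Set.add r (n, d)) = visitChildren pc g n d l r := by
  cases l with
  | nil => exact absurd rfl h
  | cons c rest =>
    simp only [visitChildren,
      pvSetAdd_idem (PySem.Set.add r (n, d)) (n, d) (add_mem_self r (n, d))]

-- the heart: popping one path off A's queue = one recursive visit of B, same fuel consumption
theorem main_step (pc : List (String × List String)) :
    ∀ f : Nat, ∀ (cur : List String) (c : String) (qs : List (List String)) (r : List (String × Int)),
      cur.getLast? = some c → (∀ p ∈ qs, p ≠ []) →
      dfsLoopA pc f (cur :: qs) r =
        dfsLoopA pc (f - (visitB pc f c ((cur.length : Int) - 1) r).1) qs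
          (visitB pc f c ((cur.length : Int) - 1) r).2 := by
  intro f
  induction f using Nat.strong_induction_on with
  | _ f IH =>
    intro cur c qs r hc hq
    match f, IH with
    | 0, _ => simp [dfsLoopA, visitB]
    | g + 1, IH =>
      cases hf : (pc.find? (fun p => p.1 == c)).map Prod.snd with
      | none =>
        simp [dfsLoopA, visitB, PySem.List.pyGet?_neg_one, hc, hf]
      | some cs =>
        -- the inner for-loop, child by child
        have child : ∀ (l : List String) (g' : Nat), g' ≤ g →
            ∀ (r' : List (String × Int)), ((c, (cur.length : Int) - 1)) ∈ r' →
            dfsLoopA pc g' (l.map (fun ch => cur ++ [ch]) ++ qs) r' =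
              dfsLoopA pc (g' - (visitChildren pc g' c ((cur.length : Int) - 1) l r').1) qs
                (visitChildren pc g' c ((cur.length : Int) - 1) l r').2 := by
          intro l
          induction l with
          | nil => intro g' _ r' _; simp [visitChildren]
          | cons ch rest ihl =>
            intro g' hg' r' hr'
            have hstep := IH g' (by omega) (cur ++ [ch]) ch (rest.map (fun ch => cur ++ [ch]) ++ qs) r'
              (by simp) ?_
            · have hD : ((cur ++ [ch]).length : Int) - 1 = ((cur.length : Int) - 1) + 1 := by
                simp [List.length_append]
              rw [hD] at hstep
              set p := visitB pc g' ch (((cur.length : Int) - 1) + 1) r' with hp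
              have hmem : ((c, (cur.length : Int) - 1)) ∈ p.2 :=
                (visit_mono pc g').1 ch (((cur.length : Int) - 1) + 1) r' _ hr'
              have htail := ihl (g' - p.1) (by omega) p.2 hmem
              simp only [List.map_cons, List.cons_append] at hstep ⊢
              rw [hstep, htail]
              simp only [visitChildren,
                pvSetAdd_idem r' (c, (cur.length : Int) - 1) hr', ← hp]
              rw [Nat.sub_sub]
            · intro q hq'
              simp only [List.mem_append, List.mem_map] at hq'
              rcases hq' with ⟨a, _, rfl⟩ | hmem
              · simp
              · exact hq q hmem
        by_cases hcs : cs = []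
        · subst hcs
          simp [dfsLoopA, visitB, visitChildren, PySem.List.pyGet?_neg_one, hc, hf]
        · have habs := visitChildren_absorb pc g c ((cur.length : Int) - 1) cs.reverse r
            (by simpa using hcs)
          have hchild := child cs.reverse g le_rfl (PySem.Set.add r (c, (cur.length : Int) - 1))
            (add_mem_self r _)
          rw [habs] at hchild
          simp only [dfsLoopA, visitB, PySem.List.pyGet?_neg_one, hc, hf,
            foldA_char cur (c, (cur.length : Int) - 1) cs qs r, if_neg hcs]
          rw [hchild]
          congr 1
          omega

-- ===== VERDICT (by name: the statement is the Claim_ definition above) =====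
theorem dfs_spec : Claim_equal_dfs := by
  intro pc parent _dom
  unfold Spec_dfs dfs dfs_alt
  have h := main_step pc (dfsFuel pc) [parent] parent [] [] (by simp) (by simp)
  simp only [List.length_cons, List.length_nil] at h
  rw [h, loopA_nil]
  norm_num
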